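-- pv_equiv track=rewrite | github.com/eseaflower/ML | rnn_test.py | contextwin
-- ===== SOURCE A (Python) =====
-- def contextwin(l, win):
--     assert (win % 2) == 1
--     assert win >= 1
--     l = list(l)
--
--     lpadded = win // 2 * [-1] + l + win // 2 * [-1]
--     out = [lpadded[i:(i + win)] for i in range(len(l))]
--
--     assert len(out) == len(l)
--     return out
-- ===== SOURCE B (Python) =====
-- def contextwin(l, win):
--     assert (win % 2) == 1
--     assert win >= 1
--     l = list(l)
--     n = len(l)
--     half = win // 2
--     out = []
--     for i in range(n):
--         row = []
--         for j in range(win):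
--             idx = i + j - half
--             row.append(l[idx] if 0 <= idx < n else -1)
--         out.append(row)
--     return out
-- ===== Notes on version B (the rewrite author's own statement) =====
-- stated objective: alternative
-- what changed: B drops the sentinel-padded buffer and slicing entirely: each window element is computed directly from its index i+j-win//2, with -1 produced by a bounds check instead of read from padding.
import Mathlib
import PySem

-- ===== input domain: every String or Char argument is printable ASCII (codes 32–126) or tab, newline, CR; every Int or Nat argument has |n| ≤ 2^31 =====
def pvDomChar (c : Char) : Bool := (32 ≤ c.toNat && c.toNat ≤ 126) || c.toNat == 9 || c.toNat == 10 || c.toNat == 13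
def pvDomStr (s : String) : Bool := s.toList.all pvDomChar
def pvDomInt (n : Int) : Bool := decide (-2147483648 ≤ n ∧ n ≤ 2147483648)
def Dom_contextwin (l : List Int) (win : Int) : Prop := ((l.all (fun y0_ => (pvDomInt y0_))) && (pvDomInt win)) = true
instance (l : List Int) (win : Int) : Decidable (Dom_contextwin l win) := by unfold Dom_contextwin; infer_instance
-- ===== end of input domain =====

-- B computes each window element directly from its index with a bounds check (-1 outside),
-- instead of slicing a sentinel-padded buffer as A does: an alternative decomposition, same cost.


-- ===== PORT A =====
-- lpadded = win // 2 * [-1] + l + win // 2 * [-1]; out = [lpadded[i:i+win] for i in range(len(l))]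
-- (Python k*[-1] is [] for k ≤ 0, matching .toNat's clamping)
def contextwin (l : List Int) (win : Int) : List (List Int) :=
  let lpadded := List.replicate (PySem.Int.floordiv win 2).toNat (-1) ++ l
                 ++ List.replicate (PySem.Int.floordiv win 2).toNat (-1)
  (List.range l.length).map (fun (i : Nat) =>
    PySem.List.slice lpadded (some (i : Int)) (some ((i : Int) + win)))

-- ===== PORT B =====
-- for each i, row j = l[i+j-win//2] if that index is in range else -1; no padded buffer
def contextwin_alt (l : List Int) (win : Int) : List (List Int) :=
  let n := l.length
  let half := PySem.Int.floordiv win 2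
  (List.range n).map (fun (i : Nat) =>
    (List.range win.toNat).map (fun (j : Nat) =>
      let idx : Int := (i : Int) + (j : Int) - half
      if 0 ≤ idx ∧ idx < (n : Int) then l.getD idx.toNat (-1) else -1))

-- ===== PRECONDITION & SPEC =====
-- Pre_ is exactly A's two asserts: win odd (Python % with positive divisor = Int.emod) and win ≥ 1.
def Pre_contextwin (l : List Int) (win : Int) : Prop := win % 2 = 1 ∧ 1 ≤ win
instance (l : List Int) (win : Int) : Decidable (Pre_contextwin l win) := by unfold Pre_contextwin; infer_instance
def pvWitness_contextwin : List Int × Int := ([1, 2, 3], 3)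

def Spec_contextwin (l : List Int) (win : Int) (out : List (List Int)) : Prop := out = contextwin_alt l win
instance (l : List Int) (win : Int) (out : List (List Int)) : Decidable (Spec_contextwin l win out) := by unfold Spec_contextwin; infer_instance

-- ===== CLAIM (what is proved, stated in full; the proofs are below) =====
def Claim_equal_contextwin : Prop := ∀ (l : List Int) (win : Int), Dom_contextwin l win → Pre_contextwin l win → Spec_contextwin l win (contextwin l win)

-- ===== LEMMAS AND PROOFS =====

theorem contextwin_main (l : List Int) (win : Int) (h1 : win % 2 = 1) (h2 : 1 ≤ win) :
    contextwin l win = contextwin_alt l win := by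
  unfold contextwin contextwin_alt
  have hfd : PySem.Int.floordiv win 2 = win / 2 :=
    PySem.Int.floordiv_eq_ediv_of_pos (by omega)
  set h : Nat := (PySem.Int.floordiv win 2).toNat with hh
  have hcast : (h : Int) = win / 2 := by rw [hh, hfd]; omega
  have hw : win.toNat = 2 * h + 1 := by omega
  apply List.map_congr_left
  intro i hi
  have hi' : i < l.length := by simpa using hi
  rw [PySem.List.slice_toNat (List.replicate h (-1) ++ l ++ List.replicate h (-1)) (by positivity) (by omega)]
  have ht1 : ((i : Int)).toNat = i := by omega
  have ht2 : ((i : Int) + win).toNat = i + win.toNat := by omega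
  rw [ht1, ht2]
  have htake : i + win.toNat - i = win.toNat := by omega
  rw [htake]
  apply List.ext_getElem
  · simp [hw]; omega
  · intro j hj1 hj2
    have hj : j < win.toNat := by simpa using hj2
    have hLHS : (List.take win.toNat (List.drop i (List.replicate h (-1 : Int) ++ l ++ List.replicate h (-1))))[j]'hj1 =
        (List.replicate h (-1 : Int) ++ l ++ List.replicate h (-1))[i + j]'(by simp; omega) := by
      simp [List.getElem_take, List.getElem_drop]
    rw [hLHS]
    simp only [List.getElem_map, List.getElem_range, hfd]
    have hlen2 : (List.replicate h (-1 : Int) ++ l).length = h + l.length := by simp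
    by_cases hc1 : i + j < h
    · rw [List.getElem_append_left (by omega), List.getElem_append_left (by simpa using hc1),
          List.getElem_replicate, if_neg (by omega)]
    · by_cases hc2 : i + j < h + l.length
      · have hidx : (((i : Int) + (j : Int)) - win / 2).toNat = i + j - h := by omega
        rw [List.getElem_append_left (by omega),
            List.getElem_append_right (by simp; omega)]
        rw [if_pos (by constructor <;> omega), hidx,
            List.getD_eq_getElem l (-1) (by omega)]
        congr 1
        simp
      · rw [List.getElem_append_right (by omega), List.getElem_replicate,
            if_neg (by omega)]

-- ===== VERDICT (by name: the statement is the Claim_ definition above) =====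
theorem contextwin_spec : Claim_equal_contextwin := by
  intro l win _ hpre
  exact contextwin_main l win hpre.1 hpre.2
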